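-- pv_equiv track=rewrite | github.com/carzdeshwyharo/telegrambotmusic | handlers/get_songs.py | get_text_preview
-- ===== SOURCE A (Python) =====
-- def get_text_preview(text, search_words, context_lines=2):
--     lines = text.split('\n')
--     preview_lines = []
--
--     for i, line in enumerate(lines):
--         line_lower = line.lower()
--         if any(word.lower() in line_lower for word in search_words):
--             start = max(0, i - context_lines)
--             end = min(len(lines), i + context_lines + 1)
--
--             for j in range(start, end):
--                 if lines[j] not in preview_lines:
--                     preview_lines.append(lines[j])
--
--     preview = "\n".join(preview_lines)
--     if len(preview) > 40:
--         preview = preview[:40]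
--
--     return preview if preview else "Отрывок не найден"
-- ===== SOURCE B (Python) =====
-- def get_text_preview(text, search_words, context_lines=2):
--     lines = text.split('\n')
--     n = len(lines)
--     lowered = [w.lower() for w in search_words]
--     matched = [any(w in ln.lower() for w in lowered) for ln in lines]
--     seen = set()
--     out = []
--     for j, ln in enumerate(lines):
--         if any(matched[i] for i in range(max(0, j - context_lines), min(n, j + context_lines + 1))) and ln not in seen:
--             seen.add(ln)
--             out.append(ln)
--     preview = "\n".join(out)[:40]
--     return preview if preview else "Отрывок не найден"
-- ===== Notes on version B (the rewrite author's own statement) =====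
-- stated objective: alternative
-- what changed: A interleaves match-finding with emitting each match's context window (nested loop, list-membership dedup); B precomputes lowered search words and a per-line boolean match mask, then makes one pass over the lines emitting line j iff some matched line lies within context_lines of j (the symmetric window test), deduplicating by value with a seen set.
import Mathlib
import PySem

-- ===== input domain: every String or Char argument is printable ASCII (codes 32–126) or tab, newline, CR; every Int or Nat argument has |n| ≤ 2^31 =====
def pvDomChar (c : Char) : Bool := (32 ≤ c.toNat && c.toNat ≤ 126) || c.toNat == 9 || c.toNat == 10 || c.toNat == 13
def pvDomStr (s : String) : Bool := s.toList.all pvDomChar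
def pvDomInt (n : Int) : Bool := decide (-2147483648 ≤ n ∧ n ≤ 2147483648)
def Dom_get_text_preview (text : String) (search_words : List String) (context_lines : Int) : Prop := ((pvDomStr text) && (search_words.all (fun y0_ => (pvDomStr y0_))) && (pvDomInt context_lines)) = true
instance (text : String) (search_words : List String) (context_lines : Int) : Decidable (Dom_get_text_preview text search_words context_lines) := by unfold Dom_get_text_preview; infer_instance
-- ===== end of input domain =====

-- B replaces A's interleaved find-and-emit nested loop by a precomputed per-line match mask and
-- ONE pass over the lines that emits line j iff some matched line lies within context_lines of j
-- (the symmetric window test), deduplicating by value with a seen set (objective: alternative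
-- decomposition, same asymptotic cost).

-- ===== PORT A =====
def get_text_preview (text : String) (search_words : List String) (context_lines : Int) : String :=
  -- text.split('\n'): the separator is the non-empty literal "\n", so split? is always `some`
  let lines := (PySem.Str.split? text "\n").getD []
  let preview_lines := (PySem.List.enumerate lines).foldl (fun acc p =>
      let line_lower := PySem.Str.lower p.2
      if search_words.any (fun word => PySem.Str.isIn (PySem.Str.lower word) line_lower) then
        (PySem.List.pyRange (max 0 (p.1 - context_lines))
            (min (lines.length : Int) (p.1 + context_lines + 1))).foldl
          (fun acc2 j =>
            -- lines[j]: j is always in range (start ≥ 0, end ≤ len(lines)), so the default is never used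
            if PySem.List.pyGetD lines j "" ∈ acc2 then acc2
            else acc2 ++ [PySem.List.pyGetD lines j ""]) acc
      else acc) []
  let preview := PySem.Str.join "\n" preview_lines
  let preview := if 40 < PySem.Str.len preview then PySem.Str.slice preview none (some 40) else preview
  if preview ≠ "" then preview else "Отрывок не найден"

-- ===== PORT B =====
def get_text_preview_alt (text : String) (search_words : List String) (context_lines : Int) : String :=
  let lines := (PySem.Str.split? text "\n").getD []   -- sep "\n" ≠ "": always `some`
  let n : Int := lines.length
  let lowered := search_words.map (fun w => PySem.Str.lower w)
  let matched := lines.map (fun ln => lowered.any (fun w => PySem.Str.isIn w (PySem.Str.lower ln)))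
  -- one pass: state is (out, seen); matched[i]: i is always a valid index, default never used
  let st := (PySem.List.enumerate lines).foldl
    (fun (st : List String × PySem.Set String) p =>
      if ((PySem.List.pyRange (max 0 (p.1 - context_lines)) (min n (p.1 + context_lines + 1))).any
            (fun i => PySem.List.pyGetD matched i false))
         && !(PySem.Set.contains st.2 p.2)
      then (st.1 ++ [p.2], PySem.Set.add st.2 p.2) else st)
    (([], PySem.Set.empty) : List String × PySem.Set String)
  let preview := PySem.Str.slice (PySem.Str.join "\n" st.1) none (some 40)
  if preview ≠ "" then preview else "Отрывок не найден"

-- ===== PRECONDITION & SPEC =====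
def Spec_get_text_preview (text : String) (search_words : List String) (context_lines : Int) (out : String) : Prop := out = get_text_preview_alt text search_words context_lines
instance (text : String) (search_words : List String) (context_lines : Int) (out : String) : Decidable (Spec_get_text_preview text search_words context_lines out) := by unfold Spec_get_text_preview; infer_instance

-- ===== CLAIM (what is proved, stated in full; the proofs are below) =====
def Claim_equal_get_text_preview : Prop := ∀ (text : String) (search_words : List String) (context_lines : Int), Dom_get_text_preview text search_words context_lines → Spec_get_text_preview text search_words context_lines (get_text_preview text search_words context_lines)

-- ===== LEMMAS AND PROOFS =====

-- the context-index window around a matched line i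
def pvR (n c i : Int) : List Int :=
  PySem.List.pyRange (max 0 (i - c)) (min n (i + c + 1))

-- A's inner emit loop as a function of the index list
def pvEmit (lines : List String) (acc : List String) (I : List Int) : List String :=
  I.foldl (fun acc j =>
    if PySem.List.pyGetD lines j "" ∈ acc then acc
    else acc ++ [PySem.List.pyGetD lines j ""]) acc

-- left-to-right dedup of an index list against an already-seen list
def pvDedupFrom (seen : List Int) : List Int → List Int
  | [] => []
  | j :: I => if j ∈ seen then pvDedupFrom seen I else j :: pvDedupFrom (seen ++ [j]) I

theorem pvMem_dedupFrom (I : List Int) : ∀ (seen : List Int) (x : Int),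
    x ∈ pvDedupFrom seen I ↔ x ∈ I ∧ x ∉ seen := by
  induction I with
  | nil => intro seen x; simp [pvDedupFrom]
  | cons j I ih =>
    intro seen x
    by_cases h : j ∈ seen
    · simp only [pvDedupFrom, if_pos h, ih]
      constructor
      · rintro ⟨hx, hs⟩; exact ⟨List.mem_cons_of_mem _ hx, hs⟩
      · rintro ⟨hx, hs⟩
        rcases List.mem_cons.mp hx with rfl | hx
        · exact absurd h hs
        · exact ⟨hx, hs⟩
    · simp only [pvDedupFrom, if_neg h, List.mem_cons, ih, List.mem_append]
      constructor
      · rintro (rfl | ⟨hx, hs⟩)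
        · exact ⟨Or.inl rfl, h⟩
        · exact ⟨Or.inr hx, fun hc => hs (Or.inl hc)⟩
      · rintro ⟨rfl | hx, hs⟩
        · exact Or.inl rfl
        · by_cases hxj : x = j
          · exact Or.inl hxj
          · exact Or.inr ⟨hx, by simp [hs, hxj]⟩

theorem pvDedupFrom_append (L₁ : List Int) : ∀ (L₂ : List Int) (s : List Int),
    pvDedupFrom s (L₁ ++ L₂) = pvDedupFrom s L₁ ++ pvDedupFrom (s ++ pvDedupFrom s L₁) L₂ := by
  induction L₁ with
  | nil => intro L₂ s; simp [pvDedupFrom]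
  | cons j L₁ ih =>
    intro L₂ s
    by_cases h : j ∈ s
    · simp [pvDedupFrom, h, ih]
    · simp [pvDedupFrom, h, ih, List.append_assoc]

theorem pvDedupFrom_of_nodup (I : List Int) (hI : I.Nodup) : ∀ (s : List Int),
    pvDedupFrom s I = I.filter (fun x => decide (x ∉ s)) := by
  induction I with
  | nil => intro s; simp [pvDedupFrom]
  | cons j I ih =>
    intro s
    rcases List.nodup_cons.mp hI with ⟨hj, hI'⟩
    by_cases h : j ∈ s
    · simp [pvDedupFrom, h, ih hI']
    · rw [show pvDedupFrom s (j :: I) = j :: pvDedupFrom (s ++ [j]) I from by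
        simp [pvDedupFrom, h]]
      rw [ih hI' (s ++ [j])]
      have hfil : I.filter (fun x => decide (x ∉ s ++ [j])) = I.filter (fun x => decide (x ∉ s)) := by
        apply List.filter_congr
        intro x hx
        have hxj : x ≠ j := fun hc => hj (hc ▸ hx)
        simp [List.mem_append, hxj]
      rw [hfil]
      simp [h]

theorem pvEmit_dedup (lines : List String) (I : List Int) : ∀ (acc : List String) (seen : List Int),
    (∀ j ∈ seen, PySem.List.pyGetD lines j "" ∈ acc) →
    pvEmit lines acc I = pvEmit lines acc (pvDedupFrom seen I) := by
  induction I with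
  | nil => intro acc seen _; rfl
  | cons j I ih =>
    intro acc seen hinv
    by_cases h : j ∈ seen
    · have hv : PySem.List.pyGetD lines j "" ∈ acc := hinv j h
      simp only [pvDedupFrom, if_pos h, pvEmit, List.foldl_cons, if_pos hv]
      exact ih acc seen hinv
    · simp only [pvDedupFrom, if_neg h, pvEmit, List.foldl_cons]
      by_cases hv : PySem.List.pyGetD lines j "" ∈ acc
      · simp only [if_pos hv]
        exact ih acc (seen ++ [j]) (by
          intro k hk
          rcases List.mem_append.mp hk with hk | hk
          · exact hinv k hk
          · rw [List.mem_singleton.mp hk]; exact hv)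
      · simp only [if_neg hv]
        exact ih _ (seen ++ [j]) (by
          intro k hk
          rcases List.mem_append.mp hk with hk | hk
          · exact List.mem_append_left _ (hinv k hk)
          · rw [List.mem_singleton.mp hk]; simp)

theorem pvPairwise_pyRange (a b : Int) : (PySem.List.pyRange a b).Pairwise (· < ·) := by
  by_cases hab : a < b
  · have h : ∀ (k : Nat) (a b : Int), (b - a).toNat = k → (PySem.List.pyRange a b).Pairwise (· < ·) := by
      intro k
      induction k with
      | zero =>
        intro a b hk
        have : ¬ a < b := by omega
        have : PySem.List.pyRange a b = [] := by
          apply List.eq_nil_iff_forall_not_mem.mpr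
          intro x hx
          have := PySem.List.mem_pyRange_one.mp hx
          omega
        simp [this]
      | succ k ih =>
        intro a b hk
        by_cases h' : a < b
        · rw [PySem.List.pyRange_one_cons h']
          refine List.pairwise_cons.mpr ⟨?_, ih (a + 1) b (by omega)⟩
          intro x hx
          have := PySem.List.mem_pyRange_one.mp hx
          omega
        · have : PySem.List.pyRange a b = [] := by
            apply List.eq_nil_iff_forall_not_mem.mpr
            intro x hx
            have := PySem.List.mem_pyRange_one.mp hx
            omega
          simp [this]
    exact h (b - a).toNat a b rfl
  · have : PySem.List.pyRange a b = [] := by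
      apply List.eq_nil_iff_forall_not_mem.mpr
      intro x hx
      have := PySem.List.mem_pyRange_one.mp hx
      omega
    simp [this]

-- the core ordering fact: the first-occurrence dedup of the concatenated windows of an
-- increasing list of matched line indices is itself strictly increasing
theorem pvSorted_dedup (n c : Int) (ms : List Int) (hms : ms.Pairwise (· < ·)) :
    (pvDedupFrom [] (ms.flatMap (pvR n c))).Pairwise (· < ·) := by
  induction ms using List.reverseRecOn with
  | nil => simp [pvDedupFrom]
  | append_singleton ms i ih =>
    have hpw : ms.Pairwise (· < ·) := hms.sublist (by simp)
    have hlt : ∀ i' ∈ ms, i' < i := by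
      have := List.pairwise_append.mp hms
      intro i' hi'
      exact this.2.2 i' hi' i (List.mem_singleton_self i)
    rw [List.flatMap_append, List.flatMap_singleton, pvDedupFrom_append, List.nil_append]
    set D := pvDedupFrom [] (ms.flatMap (pvR n c)) with hD
    have hRnodup : (pvR n c i).Nodup := (pvPairwise_pyRange _ _).imp ne_of_lt
    rw [pvDedupFrom_of_nodup _ hRnodup]
    apply List.pairwise_append.mpr
    refine ⟨ih hpw, (pvPairwise_pyRange _ _).filter _, ?_⟩
    intro y hy x hx
    rcases List.mem_filter.mp hx with ⟨hxR, hxD⟩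
    have hxD' : x ∉ D := by simpa using hxD
    have hy' := (pvMem_dedupFrom _ _ _).mp hy
    rcases List.mem_flatMap.mp hy'.1 with ⟨i', hi', hyR⟩
    have hxflat : x ∉ ms.flatMap (pvR n c) := by
      intro hc
      exact hxD' ((pvMem_dedupFrom _ _ _).mpr ⟨hc, by simp⟩)
    have hxR' : x ∉ pvR n c i' := fun hc => hxflat (List.mem_flatMap.mpr ⟨i', hi', hc⟩)
    have h1 := PySem.List.mem_pyRange_one.mp hxR
    have h2 := PySem.List.mem_pyRange_one.mp hyR
    have h3 : ¬ (max 0 (i' - c) ≤ x ∧ x < min n (i' + c + 1)) :=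
      fun hc => hxR' (PySem.List.mem_pyRange_one.mpr hc)
    have h4 := hlt i' hi'
    omega

-- Set.contains as a decide, for the seen-set invariant
theorem pvContains (s : PySem.Set String) (x : String) :
    PySem.Set.contains s x = decide (x ∈ s) := by
  by_cases h : x ∈ s <;> simp [PySem.Set.contains_eq_listContains, h]

-- B's single pass, as pvEmit over the increasing list of indices passing the window test
theorem pvEmitB (lines : List String) (wc : Int → Bool) (ps : List (Int × String)) :
    ∀ (acc : List String) (seen : PySem.Set String),
    (∀ x, PySem.Set.contains seen x = decide (x ∈ acc)) →
    (∀ p ∈ ps, PySem.List.pyGetD lines p.1 "" = p.2) →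
    (ps.foldl (fun st p => if wc p.1 && !(PySem.Set.contains st.2 p.2)
        then (st.1 ++ [p.2], PySem.Set.add st.2 p.2) else st) (acc, seen)).1
    = pvEmit lines acc ((ps.filter (fun p => wc p.1)).map (·.1)) := by
  induction ps with
  | nil => intro acc seen _ _; rfl
  | cons p ps ih =>
    intro acc seen hs hv
    have hpv : PySem.List.pyGetD lines p.1 "" = p.2 := hv p (List.mem_cons_self ..)
    have hv' : ∀ q ∈ ps, PySem.List.pyGetD lines q.1 "" = q.2 :=
      fun q hq => hv q (List.mem_cons_of_mem _ hq)
    by_cases hw : wc p.1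
    · by_cases hmem : p.2 ∈ acc
      · have hc : PySem.Set.contains seen p.2 = true := by
          rw [hs]; simp [hmem]
        rw [List.foldl_cons]
        simp only [hw, hc, Bool.not_true, Bool.and_false, Bool.false_eq_true, if_false]
        rw [ih acc seen hs hv']
        simp only [List.filter_cons, hw, if_true, List.map_cons, pvEmit, List.foldl_cons, hpv,
          if_pos hmem]
      · have hc : PySem.Set.contains seen p.2 = false := by
          rw [hs]; simp [hmem]
        rw [List.foldl_cons]
        simp only [hw, hc, Bool.not_false, Bool.and_true, if_true]
        have hinv : ∀ x, PySem.Set.contains (PySem.Set.add seen p.2) x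
            = decide (x ∈ acc ++ [p.2]) := by
          intro x
          have hsx : x ∈ seen ↔ x ∈ acc := by
            have := hs x
            rw [pvContains] at this
            exact decide_eq_decide.mp this
          rw [pvContains]
          simp [PySem.Set.mem_add, hsx]
        rw [ih (acc ++ [p.2]) (PySem.Set.add seen p.2) hinv hv']
        simp only [List.filter_cons, hw, if_true, List.map_cons, pvEmit, List.foldl_cons, hpv,
          if_neg hmem]
    · rw [List.foldl_cons]
      simp only [hw, Bool.false_and, Bool.false_eq_true, if_false]
      rw [ih acc seen hs hv']
      simp only [List.filter_cons, hw, Bool.false_eq_true, if_false]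

-- mem_pyRange over pvR, unfolded
theorem pvMem_pvR (n c i x : Int) : x ∈ pvR n c i ↔ max 0 (i - c) ≤ x ∧ x < min n (i + c + 1) :=
  PySem.List.mem_pyRange_one

-- the list-level heart of the equivalence: A's interleaved fold equals B's one-pass fold
theorem pvMain (lines : List String) (f : String → Bool) (c : Int) :
    (PySem.List.enumerate lines).foldl
        (fun acc p => if f p.2 then pvEmit lines acc (pvR (lines.length : Int) c p.1) else acc) []
    = ((PySem.List.enumerate lines).foldl
        (fun (st : List String × PySem.Set String) p =>
          if ((PySem.List.pyRange (max 0 (p.1 - c)) (min (lines.length : Int) (p.1 + c + 1))).any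
                (fun i => PySem.List.pyGetD (lines.map f) i false))
             && !(PySem.Set.contains st.2 p.2)
          then (st.1 ++ [p.2], PySem.Set.add st.2 p.2) else st)
        (([], PySem.Set.empty) : List String × PySem.Set String)).1 := by
  set n : Int := (lines.length : Int) with hn
  have hval : ∀ p ∈ PySem.List.enumerate lines, PySem.List.pyGetD lines p.1 "" = p.2 := by
    intro p hp
    rcases (PySem.List.mem_enumerate_iff _ _ _).mp hp with ⟨k, hk, rfl⟩
    simp [PySem.List.pyGetD_natCast, List.getD_eq_getElem?_getD, hk]
  -- B side
  set wc : Int → Bool := fun j =>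
    (PySem.List.pyRange (max 0 (j - c)) (min n (j + c + 1))).any
      (fun i => PySem.List.pyGetD (lines.map f) i false) with hwc
  have hB := pvEmitB lines wc (PySem.List.enumerate lines) [] PySem.Set.empty
    (by intro x; simp [PySem.Set.empty, PySem.Set.contains_eq_listContains]) hval
  rw [hB]
  -- A side
  have hA : List.foldl (fun acc p => if f p.2 = true then pvEmit lines acc (pvR n c p.1) else acc) []
      (PySem.List.enumerate lines)
    = List.foldl (fun acc p => pvEmit lines acc (pvR n c p.1)) []
      ((PySem.List.enumerate lines).filter (fun p => f p.2)) :=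
    PySem.List.foldl_if_eq_foldl_filter (fun p : Int × String => f p.2)
      (fun (acc : List String) (p : Int × String) => pvEmit lines acc (pvR n c p.1)) _ []
  rw [hA]
  set l := (PySem.List.enumerate lines).filter (fun p => f p.2) with hl
  have hfoldflat : l.foldl (fun acc p => pvEmit lines acc (pvR n c p.1)) []
      = pvEmit lines [] (l.flatMap (fun p => pvR n c p.1)) := by
    simp only [pvEmit, List.foldl_flatMap]
  rw [hfoldflat,
    pvEmit_dedup lines (l.flatMap (fun p => pvR n c p.1)) [] [] (by simp)]
  -- both sides are pvEmit over an index list; show the two index lists are equal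
  congr 1
  set S := pvDedupFrom [] (l.flatMap (fun p => pvR n c p.1)) with hS
  set J := ((PySem.List.enumerate lines).filter (fun p => wc p.1)).map (·.1) with hJ
  have hSpw : S.Pairwise (· < ·) := by
    have hIall : l.flatMap (fun p => pvR n c p.1) = (l.map (·.1)).flatMap (pvR n c) := by
      rw [List.flatMap_map]
    have hms : (l.map (·.1)).Pairwise (· < ·) :=
      List.Pairwise.map (fun p : Int × String => p.1) (fun a b h => h)
        ((PySem.List.pairwise_lt_enumerate lines 0).filter _)
    rw [hS, hIall]; exact pvSorted_dedup n c _ hms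
  have hJpw : J.Pairwise (· < ·) :=
    List.Pairwise.map (fun p : Int × String => p.1) (fun a b h => h)
      ((PySem.List.pairwise_lt_enumerate lines 0).filter _)
  -- membership characterisations
  have hSmem : ∀ x : Int, x ∈ S ↔
      ∃ k : Nat, ∃ hk : k < lines.length, f lines[k] = true ∧
        max 0 ((k : Int) - c) ≤ x ∧ x < min n ((k : Int) + c + 1) := by
    intro x
    rw [hS, pvMem_dedupFrom]
    simp only [List.not_mem_nil, not_false_iff, and_true, List.mem_flatMap, hl,
      List.mem_filter, PySem.List.mem_enumerate_iff]
    constructor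
    · rintro ⟨p, ⟨⟨k, hk, rfl⟩, hf⟩, hx⟩
      rw [pvMem_pvR] at hx
      exact ⟨k, hk, by simpa using hf, by simpa using hx.1, by simpa using hx.2⟩
    · rintro ⟨k, hk, hf, h1, h2⟩
      exact ⟨((k : Int), lines[k]), ⟨⟨k, hk, by simp⟩, by simpa using hf⟩,
        (pvMem_pvR n c k x).mpr ⟨by simpa using h1, by simpa using h2⟩⟩
  have hJmem : ∀ x : Int, x ∈ J ↔
      ∃ k : Nat, ∃ hk : k < lines.length, f lines[k] = true ∧
        max 0 ((k : Int) - c) ≤ x ∧ x < min n ((k : Int) + c + 1) := by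
    intro x
    rw [hJ]
    simp only [List.mem_map, List.mem_filter, PySem.List.mem_enumerate_iff]
    constructor
    · rintro ⟨p, ⟨⟨j, hj, rfl⟩, hw⟩, rfl⟩
      simp only [zero_add] at hw ⊢
      rw [hwc, List.any_eq_true] at hw
      rcases hw with ⟨i, hi, hget⟩
      rw [PySem.List.mem_pyRange_one] at hi
      have hi0 : 0 ≤ i := le_trans (le_max_left _ _) hi.1
      have hilen : i < n := lt_of_lt_of_le hi.2 (min_le_left _ _)
      have hieq : ((i.toNat : Int)) = i := Int.toNat_of_nonneg hi0
      have hklen : i.toNat < lines.length := by omega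
      refine ⟨i.toNat, hklen, ?_, ?_, ?_⟩
      · have hgd : PySem.List.pyGetD (List.map f lines) ((i.toNat : Nat) : Int) false
            = f lines[i.toNat] := by
          rw [PySem.List.pyGetD_natCast]
          simp [List.getD_eq_getElem?_getD, hklen]
        rw [hieq] at hgd
        rw [hgd] at hget
        exact hget
      · omega
      · omega
    · rintro ⟨k, hk, hf, h1, h2⟩
      have hj0 : 0 ≤ x := le_trans (le_max_left _ _) h1
      have hjn : x < n := lt_of_lt_of_le h2 (min_le_left _ _)
      have hxk : x.toNat < lines.length := by omega
      refine ⟨(x, lines[x.toNat]), ⟨⟨x.toNat, hxk, by simp [Int.toNat_of_nonneg hj0]⟩, ?_⟩, rfl⟩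
      rw [hwc, List.any_eq_true]
      refine ⟨(k : Int), PySem.List.mem_pyRange_one.mpr ⟨by omega, by omega⟩, ?_⟩
      simp [PySem.List.pyGetD_natCast, List.getD_eq_getElem?_getD, hk, hf]
  -- two strictly increasing lists with the same members are equal
  have hperm : S.Perm J := by
    rw [List.perm_ext_iff_of_nodup (hSpw.imp ne_of_lt) (hJpw.imp ne_of_lt)]
    intro x; rw [hSmem, hJmem]
  exact List.eq_of_perm_of_sorted (fun a b _ _ h h' => absurd h' (lt_asymm h)) hSpw hJpw hperm

theorem pvSlice40_of_le (s : String) (h : PySem.Str.len s ≤ 40) :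
    PySem.Str.slice s none (some 40) = s := by
  apply String.ext
  rw [PySem.Str.toList_slice]
  have hlen : s.toList.length ≤ 40 := by
    have := PySem.Str.len_eq s
    omega
  show PySem.List.slice s.toList none (some 40) = s.toList
  rw [PySem.List.slice_to s.toList (by norm_num)]
  show s.toList.take (Int.toNat 40) = s.toList
  rw [show Int.toNat 40 = 40 from rfl, List.take_of_length_le hlen]

-- ===== VERDICT (by name: the statement is the Claim_ definition above) =====
theorem get_text_preview_spec : Claim_equal_get_text_preview := by
  intro text search_words context_lines _
  have hTrunc : ∀ pv : String,
      (if 40 < PySem.Str.len pv then PySem.Str.slice pv none (some 40) else pv)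
      = PySem.Str.slice pv none (some 40) := by
    intro pv
    by_cases h : 40 < PySem.Str.len pv
    · rw [if_pos h]
    · rw [if_neg h, pvSlice40_of_le pv (by omega)]
  unfold Spec_get_text_preview get_text_preview get_text_preview_alt
  have hP := pvMain ((PySem.Str.split? text "\n").getD [])
    (fun ln => (search_words.map (fun w => PySem.Str.lower w)).any
      (fun w => PySem.Str.isIn w (PySem.Str.lower ln)))
    context_lines
  simp only [pvEmit, pvR, List.any_map, Function.comp_def] at hP
  simp only [List.any_map, Function.comp_def, hP, hTrunc]
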